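-- pv_equiv track=rewrite | github.com/AlifSrSE/ProblemSolves | 1007A-reorderTheArray.py | solve
-- ===== SOURCE A (Python) =====
-- def solve(a):
--     a.sort()
--     result = 0
--     index_for_smaller = 0
--     for i in range(len(a)):
--         if a[i] > a[index_for_smaller]:
--             result += 1
--             index_for_smaller += 1
--     return result
-- ===== SOURCE B (Python) =====
-- def solve(a):
--     a.sort()
--     freq = {}
--     for x in a:
--         freq[x] = freq.get(x, 0) + 1
--     best = 0
--     for v in freq.values():
--         best = max(best, v)
--     return len(a) - best
-- ===== Notes on version B (the rewrite author's own statement) =====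
-- stated objective: alternative
-- what changed: Replaces A's sorted two-pointer greedy matching pass with a frequency table: the answer is n minus the largest multiplicity (the sort is kept for the in-place mutation side effect).
import Mathlib
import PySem

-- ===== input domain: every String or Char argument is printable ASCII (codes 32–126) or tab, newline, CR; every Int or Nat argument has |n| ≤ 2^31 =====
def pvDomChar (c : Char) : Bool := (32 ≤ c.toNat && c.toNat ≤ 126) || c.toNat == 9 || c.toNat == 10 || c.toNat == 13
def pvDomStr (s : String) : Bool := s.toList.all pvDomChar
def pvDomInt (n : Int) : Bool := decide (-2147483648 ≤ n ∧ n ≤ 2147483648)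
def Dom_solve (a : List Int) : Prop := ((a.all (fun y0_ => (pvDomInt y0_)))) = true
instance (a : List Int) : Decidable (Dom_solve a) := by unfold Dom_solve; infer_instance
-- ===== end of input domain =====

-- B replaces A's two-pointer greedy over the sorted list by "n minus the largest multiplicity",
-- computed from a frequency dict (objective: alternative algorithm of the same cost).
-- A sorts its argument in place; the equivalence proved here is about the RETURN value
-- (B performs the same a.sort() mutation in Python).

-- ===== PORT A =====
-- indices i and index_for_smaller are always in range, so pyGetD's default 0 is never read
def solve (a : List Int) : Int :=
  let s := PySem.List.sorted a (fun x => x) false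
  let st := (PySem.List.pyRange 0 (s.length : Int) 1).foldl
    (fun (st : Int × Int) i =>
      if PySem.List.pyGetD s st.2 0 < PySem.List.pyGetD s i 0 then (st.1 + 1, st.2 + 1) else st)
    (0, 0)
  st.1

-- ===== PORT B =====
def solve_alt (a : List Int) : Int :=
  let s := PySem.List.sorted a (fun x => x) false
  let freq := s.foldl (fun (d : PySem.Dict Int Int) x => d.insert x (d.getD x 0 + 1)) PySem.Dict.empty
  let best := freq.values.foldl max 0
  (s.length : Int) - best

-- ===== PRECONDITION & SPEC =====
def Spec_solve (a : List Int) (out : Int) : Prop := out = solve_alt a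
instance (a : List Int) (out : Int) : Decidable (Spec_solve a out) := by unfold Spec_solve; infer_instance

-- ===== CLAIM (what is proved, stated in full; the proofs are below) =====
def Claim_equal_solve : Prop := ∀ (a : List Int), Dom_solve a → Spec_solve a (solve a)

-- ===== LEMMAS AND PROOFS =====

-- largest multiplicity of an element of l (0 for [])
def maxMult (l : List Int) : Nat := (l.map (fun x => l.count x)).foldl max 0

-- the body of A's loop, with the sorted list s fixed
def stepA (s : List Int) (st : Int × Int) (x : Int) : Int × Int :=
  if PySem.List.pyGetD s st.2 0 < x then (st.1 + 1, st.2 + 1) else st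

theorem foldlmax_le {l : List Nat} {i b : Nat} (hi : i ≤ b) (h : ∀ a ∈ l, a ≤ b) :
    l.foldl max i ≤ b := by
  induction l generalizing i with
  | nil => exact hi
  | cons x t ih =>
      exact ih (max_le hi (h x (by simp))) (fun a ha => h a (by simp [ha]))

theorem init_le_foldlmax (l : List Nat) (i : Nat) : i ≤ l.foldl max i := by
  induction l generalizing i with
  | nil => simp
  | cons x t ih => exact le_trans (le_max_left _ _) (ih _)

theorem le_foldlmax {l : List Nat} {i a : Nat} (h : a ∈ l) : a ≤ l.foldl max i := by
  induction l generalizing i with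
  | nil => simp at h
  | cons x t ih =>
      rcases List.mem_cons.1 h with rfl | ha
      · exact le_trans (le_max_right i a) (init_le_foldlmax t _)
      · exact ih ha

theorem maxMult_le_length (l : List Int) : maxMult l ≤ l.length := by
  refine foldlmax_le (Nat.zero_le _) ?_
  intro a ha
  rcases List.mem_map.1 ha with ⟨x, _, rfl⟩
  exact List.count_le_length

theorem count_le_maxMult {l : List Int} {x : Int} (hx : x ∈ l) : l.count x ≤ maxMult l :=
  le_foldlmax (List.mem_map.2 ⟨x, hx, rfl⟩)

theorem maxMult_append_singleton (p : List Int) (x : Int) :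
    maxMult (p ++ [x]) = max (maxMult p) (p.count x + 1) := by
  apply Nat.le_antisymm
  · refine foldlmax_le (Nat.zero_le _) ?_
    intro a ha
    rcases List.mem_map.1 ha with ⟨y, hy, rfl⟩
    by_cases hyx : y = x
    · subst hyx
      simp [List.count_append]
    · have hy' : y ∈ p := by
        rcases List.mem_append.1 hy with h | h
        · exact h
        · simp at h; exact absurd h hyx
      have hcy : (p ++ [x]).count y = p.count y := by
        simp [List.count_append, List.count_singleton]
        omega
      rw [hcy]
      exact le_trans (count_le_maxMult hy') (le_max_left _ _)
  · refine max_le ?_ ?_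
    · refine foldlmax_le (Nat.zero_le _) ?_
      intro a ha
      rcases List.mem_map.1 ha with ⟨y, hy, rfl⟩
      have hle : p.count y ≤ (p ++ [x]).count y := by
        simp [List.count_append]
      exact le_trans hle (le_foldlmax (List.mem_map.2 ⟨y, by simp [hy], rfl⟩))
    · have hcx : (p ++ [x]).count x = p.count x + 1 := by
        simp [List.count_append]
      exact hcx ▸ le_foldlmax (List.mem_map.2 ⟨x, by simp, rfl⟩)

theorem maxMult_pos {l : List Int} (h : l ≠ []) : 1 ≤ maxMult l := by
  rcases l with _ | ⟨x, t⟩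
  · exact absurd rfl h
  · have hx : 1 ≤ (x :: t).count x := by
      have := List.count_pos_iff.2 (List.mem_cons_self (l := t) (a := x))
      omega
    exact le_trans hx (count_le_maxMult (by simp))

-- sorted lists are index-monotone
theorem sorted_mono {s : List Int} (hs : s.Pairwise (· ≤ ·)) {i k : Nat}
    (hik : i ≤ k) (hk : k < s.length) : s[i]'(lt_of_le_of_lt hik hk) ≤ s[k] := by
  rcases Nat.lt_or_ge i k with h | h
  · exact (List.pairwise_iff_getElem.1 hs) i k _ hk h
  · have : i = k := le_antisymm hik h
    subst this; exact le_refl _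

-- CRUX: in a sorted list s = p ++ x :: t, x occurs ≥ c times in p iff s[|p| - c] = x (1 ≤ c ≤ |p|)
theorem count_ge_iff_getElem {s p t : List Int} {x : Int}
    (hs : s.Pairwise (· ≤ ·)) (h : s = p ++ x :: t) {c : Nat} (hc1 : 1 ≤ c) (hc2 : c ≤ p.length) :
    c ≤ p.count x ↔ s[p.length - c]'(by subst h; simp; omega) = x := by
  have hlen : p.length < s.length := by subst h; simp
  have hpx : s[p.length]'hlen = x := by
    subst h; rw [List.getElem_append_right (le_refl _)]; simp
  have hsk : ∀ k (hk : k < p.length), s[k]'(lt_trans hk hlen) = p[k] := by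
    intro k hk; subst h; rw [List.getElem_append_left hk]
  constructor
  · intro hcount
    by_contra hne
    -- then no index ≤ |p| - c holds x, so all occurrences live in the last c - 1 slots
    have hnone : ∀ k (hk : k ≤ p.length - c), p[k]'(by omega) ≠ x := by
      intro k hk hkx
      apply hne
      have h1 : s[k]'(by omega) ≤ s[p.length - c]'(by omega) :=
        sorted_mono hs hk (by omega)
      have h2 : s[p.length - c]'(by omega) ≤ s[p.length]'hlen :=
        sorted_mono hs (by omega) hlen
      rw [hsk k (by omega)] at h1
      rw [hkx] at h1
      rw [hpx] at h2
      omega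
    have hcnt0 : List.count x (p.take (p.length - c + 1)) = 0 := by
      refine List.count_eq_zero.2 ?_
      intro hmem
      rcases List.mem_iff_getElem.1 hmem with ⟨k, hk, hkx⟩
      have hk' : k ≤ p.length - c := by
        have hkl := hk
        simp [List.length_take] at hkl
        omega
      rw [List.getElem_take] at hkx
      exact hnone k hk' hkx
    have hle : List.count x (p.drop (p.length - c + 1)) ≤ c - 1 := by
      have hll := List.count_le_length (l := p.drop (p.length - c + 1)) (a := x)
      simp [List.length_drop] at hll ⊢
      omega
    have hlt : p.count x ≤ c - 1 := by
      conv_lhs => rw [show p = p.take (p.length - c + 1) ++ p.drop (p.length - c + 1) by simp]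
      rw [List.count_append, hcnt0]
      omega
    omega
  · intro hx
    -- all of the last c slots of p hold x
    have hall : ∀ k (hk1 : p.length - c ≤ k) (hk2 : k < p.length), p[k]'hk2 = x := by
      intro k hk1 hk2
      have h1 : s[p.length - c]'(by omega) ≤ s[k]'(by omega) := sorted_mono hs hk1 (by omega)
      have h2 : s[k]'(by omega) ≤ s[p.length]'hlen := sorted_mono hs (le_of_lt hk2) hlen
      rw [hx] at h1; rw [hpx] at h2; rw [hsk k hk2] at h1 h2; omega
    have hdrop : List.count x (p.drop (p.length - c)) = c := by
      have hlendrop : (p.drop (p.length - c)).length = c := by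
        simp [List.length_drop]; omega
      have hcl : List.count x (p.drop (p.length - c)) = (p.drop (p.length - c)).length := by
        refine (List.count_eq_length (a := x) (l := p.drop (p.length - c))).2 ?_
        intro b hb
        rcases List.mem_iff_getElem.1 hb with ⟨k, hk, hkb⟩
        rw [List.getElem_drop] at hkb
        rw [hall (p.length - c + k) (by omega) (by omega)] at hkb
        exact hkb
      rw [hcl, hlendrop]
    calc c = List.count x (p.drop (p.length - c)) := hdrop.symm
      _ ≤ p.count x := by
          conv_rhs => rw [show p = p.take (p.length - c) ++ p.drop (p.length - c) by simp]
          rw [List.count_append]; omega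

-- loop invariant for A: after processing the prefix p, both components equal |p| - maxMult p
theorem loop_inv {s : List Int} (hs : s.Pairwise (· ≤ ·)) :
    ∀ t p, s = p ++ t →
      t.foldl (stepA s) (((p.length : Int) - (maxMult p : Int)), ((p.length : Int) - (maxMult p : Int)))
        = (((s.length : Int) - (maxMult s : Int)), ((s.length : Int) - (maxMult s : Int))) := by
  intro t
  induction t with
  | nil => intro p hp; subst hp; simp
  | cons x t ih =>
      intro p hp
      have hMle : maxMult p ≤ p.length := maxMult_le_length p
      have hlenp : p.length < s.length := by subst hp; simp
      have hget : PySem.List.pyGetD s ((p.length : Int) - (maxMult p : Int)) 0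
          = s[p.length - maxMult p]'(by omega) := by
        rw [PySem.List.pyGetD_eq_getElem s 0 (by omega) (by omega)]
        congr 1
        omega
      have hpx : s[p.length]'hlenp = x := by
        subst hp; rw [List.getElem_append_right (le_refl _)]; simp
      have hnext : stepA s (((p.length : Int) - (maxMult p : Int)), ((p.length : Int) - (maxMult p : Int))) x
          = ((((p ++ [x]).length : Int) - (maxMult (p ++ [x]) : Int)),
             (((p ++ [x]).length : Int) - (maxMult (p ++ [x]) : Int))) := by
        simp only [stepA, hget]
        by_cases hcond : s[p.length - maxMult p]'(by omega) < x
        · -- branch taken: x strictly beats s[j]; the max multiplicity does not grow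
          rw [if_pos hcond]
          have hpne : p ≠ [] := by
            intro h0
            subst h0
            simp only [List.length_nil, maxMult, List.map_nil, List.foldl_nil, Nat.sub_zero] at hcond
            simp only [List.length_nil] at hpx
            rw [hpx] at hcond
            omega
          have hM1 : 1 ≤ maxMult p := maxMult_pos hpne
          have hne : s[p.length - maxMult p]'(by omega) ≠ x := ne_of_lt hcond
          have hcnt : ¬ (maxMult p ≤ p.count x) := by
            intro hcnt
            exact hne ((count_ge_iff_getElem hs hp hM1 hMle).1 hcnt)
          have hMnew : maxMult (p ++ [x]) = maxMult p := by
            rw [maxMult_append_singleton]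
            omega
          rw [hMnew]
          simp only [List.length_append, List.length_cons, List.length_nil, Prod.mk.injEq]
          constructor <;> push_cast <;> ring
        · -- branch not taken: s[j] = x; the max multiplicity grows by one
          rw [if_neg hcond]
          have hle : s[p.length - maxMult p]'(by omega) ≤ s[p.length]'hlenp :=
            sorted_mono hs (by omega) hlenp
          have heq : s[p.length - maxMult p]'(by omega) = x := by
            rw [hpx] at hle
            have : ¬ s[p.length - maxMult p]'(by omega) < x := hcond
            omega
          have hMnew : maxMult (p ++ [x]) = maxMult p + 1 := by
            by_cases hp0 : p = []
            · subst hp0; simp [maxMult]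
            · have hM1 : 1 ≤ maxMult p := maxMult_pos hp0
              have hcnt : maxMult p ≤ p.count x := (count_ge_iff_getElem hs hp hM1 hMle).2 heq
              have hxp : x ∈ p := by
                have : 0 < p.count x := by omega
                exact List.count_pos_iff.1 this
              have := count_le_maxMult hxp
              rw [maxMult_append_singleton]
              omega
          rw [hMnew]
          simp only [List.length_append, List.length_cons, List.length_nil, Prod.mk.injEq]
          constructor <;> push_cast <;> ring
      rw [List.foldl_cons, hnext]
      exact ih (p ++ [x]) (by simp [hp])

-- A computes n - maxMult of the sorted list
theorem solve_eq (a : List Int) :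
    solve a = ((PySem.List.sorted a (fun x => x) false).length : Int)
      - (maxMult (PySem.List.sorted a (fun x => x) false) : Int) := by
  have key : ∀ (s : List Int), s.Pairwise (· ≤ ·) →
      (List.foldl
        (fun (st : Int × Int) i =>
          if PySem.List.pyGetD s st.2 0 < PySem.List.pyGetD s i 0 then (st.1 + 1, st.2 + 1) else st)
        (0, 0) (PySem.List.pyRange 0 (s.length : Int) 1)).1
        = (s.length : Int) - (maxMult s : Int) := by
    intro s hs
    have hfun : (fun (st : Int × Int) i =>
          if PySem.List.pyGetD s st.2 0 < PySem.List.pyGetD s i 0 then (st.1 + 1, st.2 + 1) else st)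
        = (fun acc j => stepA s acc (PySem.List.pyGetD s j 0)) := rfl
    rw [hfun, PySem.List.foldl_pyRange_zero_pyGetD' s 0 (stepA s) ((0 : Int), (0 : Int))]
    have h0 : (((0 : Int)), ((0 : Int)))
        = (((([] : List Int).length : Int) - (maxMult [] : Int)),
           ((([] : List Int).length : Int) - (maxMult [] : Int))) := by
      simp [maxMult]
    rw [h0, loop_inv hs s [] (by simp)]
  have hpair : (PySem.List.sorted a (fun x => x) false).Pairwise (· ≤ ·) := by
    have := PySem.List.sorted_pairwise (xs := a) (key := fun x => x)
    simpa using this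
  exact key _ hpair

-- B's max-of-dict-values equals maxMult
theorem foldlmax_int_cast (l : List Nat) (i : Nat) :
    (l.map (fun (n : Nat) => (n : Int))).foldl max (i : Int) = ((l.foldl max i : Nat) : Int) := by
  induction l generalizing i with
  | nil => simp
  | cons x t ih =>
      simp only [List.map_cons, List.foldl_cons]
      rw [show (max (i : Int) (x : Int)) = ((max i x : Nat) : Int) by push_cast; rfl]
      exact ih _

theorem maxMult_eq_distinct (s : List Int) :
    (((PySem.Set.ofList s : List Int)).map (fun k => s.count k)).foldl max 0 = maxMult s := by
  apply Nat.le_antisymm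
  · refine foldlmax_le (Nat.zero_le _) ?_
    intro a ha
    rcases List.mem_map.1 ha with ⟨k, hk, rfl⟩
    have hk' : k ∈ s := (PySem.Set.mem_ofList s k).1 hk
    exact count_le_maxMult hk'
  · refine foldlmax_le (Nat.zero_le _) ?_
    intro a ha
    rcases List.mem_map.1 ha with ⟨k, hk, rfl⟩
    exact le_foldlmax (List.mem_map.2 ⟨k, (PySem.Set.mem_ofList s k).2 hk, rfl⟩)

theorem solve_alt_eq (a : List Int) :
    solve_alt a = ((PySem.List.sorted a (fun x => x) false).length : Int)
      - (maxMult (PySem.List.sorted a (fun x => x) false) : Int) := by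
  have key : ∀ (s : List Int),
      ((s.foldl (fun (d : PySem.Dict Int Int) x => d.insert x (d.getD x 0 + 1)) PySem.Dict.empty).values.foldl max 0 : Int)
        = (maxMult s : Int) := by
    intro s
    rw [PySem.Dict.foldl_insert_getD_add_one_eq_counter s]
    have hvals : (PySem.Dict.counter s).values
        = ((PySem.Set.ofList s : List Int)).map (fun k => (s.count k : Int)) := by
      show ((PySem.Dict.counter s).items).map (·.2) = _
      rw [PySem.Dict.items_counter s, List.map_map]
      rfl
    rw [hvals]
    have hcast := foldlmax_int_cast (((PySem.Set.ofList s : List Int)).map (fun k => s.count k)) 0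
    rw [List.map_map, maxMult_eq_distinct] at hcast
    simpa [Function.comp] using hcast
  show ((PySem.List.sorted a (fun x => x) false).length : Int) - _ = _
  rw [key]

-- ===== VERDICT (by name: the statement is the Claim_ definition above) =====
theorem solve_spec : Claim_equal_solve := by
  intro a _
  unfold Spec_solve
  rw [solve_eq, solve_alt_eq]
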